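-- pv_equiv track=rewrite | github.com/prezentini/estudo_python | d003.py | tautograma
-- ===== SOURCE A (Python) =====
-- def tautograma(frase):
--     listap = frase.split()
--
--     pl = (listap [0][0]).lower()
--     contador = 0
--     while contador < len(listap):
--         if (listap[contador][0]).lower() != pl:
--             return 'N'
--         contador += 1
--     return 'Y'
-- ===== SOURCE B (Python) =====
-- def tautograma(frase):
--     listap = frase.split()
--     pl = listap[0][0].lower()
--     letters = {p[0].lower() for p in listap}
--     return 'Y' if letters == {pl} else 'N'
-- ===== Notes on version B (the rewrite author's own statement) =====
-- stated objective: simpler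
-- what changed: B aggregates the set of distinct lowercased first letters of all words and compares it with {first word's letter}, instead of A's counter-driven while loop with early return; the explicit listap[0][0] access preserves A's IndexError on a phrase with no words, which Pre_ excludes.
import Mathlib
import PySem

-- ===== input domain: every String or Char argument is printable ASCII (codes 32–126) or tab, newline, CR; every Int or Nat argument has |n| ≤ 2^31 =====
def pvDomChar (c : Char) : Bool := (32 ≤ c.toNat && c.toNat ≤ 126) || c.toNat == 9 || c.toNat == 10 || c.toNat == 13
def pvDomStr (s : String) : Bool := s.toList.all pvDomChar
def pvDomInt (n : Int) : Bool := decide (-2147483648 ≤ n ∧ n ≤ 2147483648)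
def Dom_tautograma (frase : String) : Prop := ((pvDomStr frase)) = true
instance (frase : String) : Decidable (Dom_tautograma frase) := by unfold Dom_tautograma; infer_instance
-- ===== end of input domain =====

-- B checks that the set of distinct lowercased first letters equals {first word's letter}
-- instead of A's counter while-loop with early return; equivalence of the RETURN value on
-- phrases containing at least one word (both raise IndexError on a word-less phrase).

-- ===== PORT A =====
-- listap[contador][0].lower(): words of split() are nonempty, so the headD default never fires
def tautogramaLoop (pl : Char) : List String → String
  | [] => "Y"
  | w :: ws =>
      if PySem.Chars.lowerChar (w.toList.headD ' ') ≠ pl then "N"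
      else tautogramaLoop pl ws

def tautograma (frase : String) : String :=
  let listap := PySem.Str.split₀ frase
  let pl := PySem.Chars.lowerChar ((listap.headD "").toList.headD ' ')
  tautogramaLoop pl listap

-- ===== PORT B =====
def tautograma_alt (frase : String) : String :=
  let listap := PySem.Str.split₀ frase
  let pl := PySem.Chars.lowerChar ((listap.headD "").toList.headD ' ')
  let letters : PySem.Set Char :=
    PySem.Set.ofList (listap.map (fun p => PySem.Chars.lowerChar (p.toList.headD ' ')))
  if PySem.Set.equal letters (PySem.Set.ofList [pl]) then "Y" else "N"

-- ===== PRECONDITION & SPEC =====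
-- Pre_ excludes exactly the phrases with no words, on which both A and B raise IndexError at listap[0]
def Pre_tautograma (frase : String) : Prop := PySem.Str.split₀ frase ≠ []
instance (frase : String) : Decidable (Pre_tautograma frase) := by unfold Pre_tautograma; infer_instance
def pvWitness_tautograma : String := "Ana amou Antes"
def Spec_tautograma (frase : String) (out : String) : Prop := out = tautograma_alt frase
instance (frase : String) (out : String) : Decidable (Spec_tautograma frase out) := by unfold Spec_tautograma; infer_instance

-- ===== CLAIM (what is proved, stated in full; the proofs are below) =====
def Claim_equal_tautograma : Prop := ∀ (frase : String), Dom_tautograma frase → Pre_tautograma frase → Spec_tautograma frase (tautograma frase)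

-- ===== LEMMAS AND PROOFS =====

theorem tautogramaLoop_eq_all (pl : Char) (l : List String) :
    tautogramaLoop pl l =
      if l.all (fun w => PySem.Chars.lowerChar (w.toList.headD ' ') == pl) then "Y" else "N" := by
  induction l with
  | nil => rfl
  | cons w ws ih =>
      simp only [tautogramaLoop, ih, List.all_cons]
      by_cases h : PySem.Chars.lowerChar (w.toList.headD ' ') = pl
      · rw [if_neg (not_not_intro h)]
        simp only [h, beq_self_eq_true, Bool.true_and]
      · rw [if_pos h]
        simp only [beq_eq_false_iff_ne.mpr h, Bool.false_and]
        rfl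

theorem set_equal_singleton_iff (xs : List Char) (pl : Char) (hmem : pl ∈ xs) :
    PySem.Set.equal (PySem.Set.ofList xs) (PySem.Set.ofList [pl]) = true ↔
      ∀ x ∈ xs, x = pl := by
  rw [PySem.Set.equal_iff]
  constructor
  · intro h x hx
    have := (h x).mp (by simpa [PySem.Set.mem_ofList] using hx)
    simpa [PySem.Set.mem_ofList] using this
  · intro h x
    simp only [PySem.Set.mem_ofList, List.mem_singleton]
    exact ⟨fun hx => h x hx, fun hx => hx ▸ hmem⟩

theorem tautograma_key (l : List String) (h : l ≠ []) :
    tautogramaLoop (PySem.Chars.lowerChar ((l.headD "").toList.headD ' ')) l =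
      if PySem.Set.equal
           (PySem.Set.ofList (l.map (fun p => PySem.Chars.lowerChar (p.toList.headD ' '))))
           (PySem.Set.ofList [PySem.Chars.lowerChar ((l.headD "").toList.headD ' ')]) then "Y" else "N" := by
  obtain ⟨w, ws, rfl⟩ := List.exists_cons_of_ne_nil h
  set f : String → Char := fun p => PySem.Chars.lowerChar (p.toList.headD ' ') with hf
  have hhead : PySem.Chars.lowerChar (((w :: ws).headD "").toList.headD ' ') = f w := rfl
  rw [hhead, tautogramaLoop_eq_all]
  have hmem : f w ∈ (w :: ws).map f := List.mem_map_of_mem (by simp)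
  have hiff := set_equal_singleton_iff ((w :: ws).map f) (f w) hmem
  have hcond : PySem.Set.equal
      (PySem.Set.ofList ((w :: ws).map f)) (PySem.Set.ofList [f w])
      = (w :: ws).all (fun x => f x == f w) := by
    rw [Bool.eq_iff_iff, hiff]
    simp [List.all_eq_true]
  rw [hcond]

-- ===== VERDICT (by name: the statement is the Claim_ definition above) =====
theorem tautograma_spec : Claim_equal_tautograma := by
  intro frase _ hpre
  unfold Pre_tautograma at hpre
  simp only [Spec_tautograma, tautograma, tautograma_alt]
  exact tautograma_key (PySem.Str.split₀ frase) hpre
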